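-- pv_equiv track=rewrite | github.com/kishorkumarravi/seating_algorithm | seating_algorithm.py | fill_seat
-- ===== SOURCE A (Python) =====
-- def fill_seat(main_list, n, main_count, layout):
--     child_list = []
--     for list_a in main_list:
--         if len(list_a) > n:
--             str_va = list_a[n]
--
--             if layout == 'A':
--                 str_va, main_count, child_list = fill_seat_layout(str_va, main_count, child_list, layout)
--             if layout == 'W':
--                 str_va, main_count, child_list = fill_seat_layout(str_va, main_count, child_list, layout)
--             if layout == 'M':
--                 str_va, main_count, child_list = fill_seat_layout(str_va, main_count, child_list, layout)
--
--         else: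
--             child_list.append('')
--
--     return main_count, child_list
--
-- def fill_seat_layout(str_va, main_count, child_list, layout):
--     """ Assign seat number based on seat layout """
--     if layout in str_va:
--         if str_va.count(layout) == 1:
--             str_rep = str_va.replace(layout, str(main_count))
--         else:
--             str_rep = str_va.replace(layout, str(main_count), 1)
--             main_count = main_count+1
--             str_rep = str_rep.replace(layout, str(main_count), 1)
--
--         main_count = main_count+1
--         child_list.append(str_rep)
--     else:
--         child_list.append(str_va)
--     return str_va, main_count, child_list
-- ===== SOURCE B (Python) =====
-- def fill_seat(main_list, n, main_count, layout):
--     child_list = []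
--     for list_a in main_list:
--         if len(list_a) > n:
--             if layout in ('A', 'W', 'M'):
--                 out = []
--                 reps = 0
--                 for ch in list_a[n]:
--                     if ch == layout and reps < 2:
--                         out.append(str(main_count))
--                         main_count += 1
--                         reps += 1
--                     else:
--                         out.append(ch)
--                 child_list.append(''.join(out))
--         else:
--             child_list.append('')
--     return main_count, child_list
-- ===== Notes on version B (the rewrite author's own statement) =====
-- stated objective: simpler
-- what changed: B inlines the helper and replaces the count/branch/replace-all-vs-replace(...,1) logic with a single counter-driven character scan per row that substitutes the first two occurrences of the layout character directly.
import Mathlib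
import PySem

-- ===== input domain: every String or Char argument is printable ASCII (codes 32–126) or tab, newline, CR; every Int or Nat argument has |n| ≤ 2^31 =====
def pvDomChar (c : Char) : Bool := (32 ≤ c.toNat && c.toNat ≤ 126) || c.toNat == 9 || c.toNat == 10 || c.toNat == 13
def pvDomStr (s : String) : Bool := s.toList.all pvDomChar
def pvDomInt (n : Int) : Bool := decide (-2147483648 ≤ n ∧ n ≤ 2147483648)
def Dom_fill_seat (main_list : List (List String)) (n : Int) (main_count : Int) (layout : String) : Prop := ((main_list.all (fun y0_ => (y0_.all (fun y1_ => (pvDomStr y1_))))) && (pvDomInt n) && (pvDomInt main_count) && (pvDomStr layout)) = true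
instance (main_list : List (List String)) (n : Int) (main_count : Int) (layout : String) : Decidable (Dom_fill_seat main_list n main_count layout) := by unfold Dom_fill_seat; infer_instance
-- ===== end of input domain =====

-- B inlines the helper and replaces the count/branch/replace(...,1) logic with one counter-driven
-- character scan per row (objective: simpler, one uniform pass instead of four string traversals).

-- ===== PORT A =====
-- hand port of Python's s.replace(old, new, 1): exact for nonempty old
-- (A only ever calls it with old = "A"/"W"/"M")
def pyReplace1 : List Char → List Char → List Char → List Char
  | [], _, _ => []
  | ch :: t, old, new =>
    if old.isPrefixOf (ch :: t) then new ++ (ch :: t).drop old.length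
    else ch :: pyReplace1 t old new

def fill_seat_layout (str_va : String) (main_count : Int) (child_list : List String) (layout : String) : String × Int × List String :=
  if PySem.Str.isIn layout str_va then
    if PySem.Str.count str_va layout = 1 then
      let str_rep := PySem.Str.replace str_va layout (PySem.Int.toStr main_count)
      (str_va, main_count + 1, child_list ++ [str_rep])
    else
      let r1 := pyReplace1 str_va.toList layout.toList (PySem.Int.toChars main_count)
      let mc := main_count + 1
      let r2 := pyReplace1 r1 layout.toList (PySem.Int.toChars mc)
      (str_va, mc + 1, child_list ++ [String.ofList r2])
  else
    (str_va, main_count, child_list ++ [str_va])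

def fill_seat (main_list : List (List String)) (n : Int) (main_count : Int) (layout : String) : Int × List String :=
  main_list.foldl (fun st list_a =>
    if (list_a.length : Int) > n then
      match PySem.List.pyGet? list_a n with
      | some str_va =>
        let r1 := if layout == "A" then fill_seat_layout str_va st.1 st.2 layout else (str_va, st.1, st.2)
        let r2 := if layout == "W" then fill_seat_layout r1.1 r1.2.1 r1.2.2 layout else r1
        let r3 := if layout == "M" then fill_seat_layout r2.1 r2.2.1 r2.2.2 layout else r2
        (r3.2.1, r3.2.2)
      | none => st   -- IndexError in Python; excluded by Pre_fill_seat
    else (st.1, st.2 ++ [""])) (main_count, [])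

-- ===== PORT B =====
def fill_seat_alt (main_list : List (List String)) (n : Int) (main_count : Int) (layout : String) : Int × List String :=
  main_list.foldl (fun st list_a =>
    if (list_a.length : Int) > n then
      if layout == "A" || layout == "W" || layout == "M" then
        let str_va := (PySem.List.pyGet? list_a n).getD ""
        let r := str_va.toList.foldl (fun (acc : List Char × Nat × Int) ch =>
            if [ch] == layout.toList && decide (acc.2.1 < 2) then
              (acc.1 ++ PySem.Int.toChars acc.2.2, acc.2.1 + 1, acc.2.2 + 1)
            else (acc.1 ++ [ch], acc.2.1, acc.2.2)) ([], 0, st.1)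
        (r.2.2, st.2 ++ [String.ofList r.1])
      else st
    else (st.1, st.2 ++ [""])) (main_count, [])

-- ===== PRECONDITION & SPEC =====
-- Pre_ excludes exactly the inputs where Python A raises IndexError: a negative n together
-- with some row shorter than |n| (the row is then indexed although the bound check passes).
def Pre_fill_seat (main_list : List (List String)) (n : Int) (main_count : Int) (layout : String) : Prop :=
  0 ≤ n ∨ ∀ la ∈ main_list, -(la.length : Int) ≤ n
instance (main_list : List (List String)) (n : Int) (main_count : Int) (layout : String) : Decidable (Pre_fill_seat main_list n main_count layout) := by unfold Pre_fill_seat; infer_instance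

def pvWitness_fill_seat : List (List String) × Int × Int × String := ([["AA2", "3W"], []], 0, 5, "A")

def Spec_fill_seat (main_list : List (List String)) (n : Int) (main_count : Int) (layout : String) (out : Int × List String) : Prop := out = fill_seat_alt main_list n main_count layout
instance (main_list : List (List String)) (n : Int) (main_count : Int) (layout : String) (out : Int × List String) : Decidable (Spec_fill_seat main_list n main_count layout out) := by unfold Spec_fill_seat; infer_instance

-- ===== CLAIM (what is proved, stated in full; the proofs are below) =====
def Claim_equal_fill_seat : Prop := ∀ (main_list : List (List String)) (n : Int) (main_count : Int) (layout : String), Dom_fill_seat main_list n main_count layout → Pre_fill_seat main_list n main_count layout → Spec_fill_seat main_list n main_count layout (fill_seat main_list n main_count layout)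

-- ===== LEMMAS AND PROOFS =====

-- (helper definitions and lemmas for the proofs)

-- helper: single-character replacement with a budget of 2, the pure recursion behind B's scan
def rep2 (c : Char) : List Char → Nat → Int → List Char × Nat × Int
  | [], reps, m => ([], reps, m)
  | ch :: t, reps, m =>
    if ch = c ∧ reps < 2 then
      (PySem.Int.toChars m ++ (rep2 c t (reps + 1) (m + 1)).1, (rep2 c t (reps + 1) (m + 1)).2)
    else
      (ch :: (rep2 c t reps m).1, (rep2 c t reps m).2)

lemma scan_eq_rep2 (c : Char) (s : List Char) : ∀ (out : List Char) (reps : Nat) (m : Int),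
    s.foldl (fun (acc : List Char × Nat × Int) ch =>
      if [ch] == [c] && decide (acc.2.1 < 2) then
        (acc.1 ++ PySem.Int.toChars acc.2.2, acc.2.1 + 1, acc.2.2 + 1)
      else (acc.1 ++ [ch], acc.2.1, acc.2.2)) (out, reps, m)
    = (out ++ (rep2 c s reps m).1, (rep2 c s reps m).2) := by
  induction s with
  | nil => intro out reps m; simp [rep2]
  | cons ch t ih =>
    intro out reps m
    by_cases h1 : ch = c
    · by_cases h2 : reps < 2
      · rw [List.foldl_cons, if_pos (show ([ch] == [c] && decide (reps < 2)) = true by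
          simp [h1, h2]), ih]
        simp [rep2, h1, h2]
      · rw [List.foldl_cons, if_neg (show ¬ ([ch] == [c] && decide (reps < 2)) = true by
          simp [h2]), ih]
        simp [rep2, h1, h2]
    · rw [List.foldl_cons, if_neg (show ¬ ([ch] == [c] && decide (reps < 2)) = true by
        simp [h1]), ih]
      simp [rep2, h1]

lemma rep2_not_lt (c : Char) (t : List Char) (reps : Nat) (m : Int) (h : ¬ reps < 2) :
    rep2 c t reps m = (t, reps, m) := by
  induction t with
  | nil => simp [rep2]
  | cons ch t ih => simp [rep2, h, ih]

lemma rep2_not_mem {c : Char} {t : List Char} (h : c ∉ t) (reps : Nat) (m : Int) :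
    rep2 c t reps m = (t, reps, m) := by
  induction t with
  | nil => simp [rep2]
  | cons ch t ih =>
    have h1 : ch ≠ c := fun he => h (he ▸ List.mem_cons_self)
    have h2 : c ∉ t := fun he => h (List.mem_cons_of_mem _ he)
    simp [rep2, h1, ih h2]

lemma rep2_append {c : Char} {p : List Char} (h : c ∉ p) (r : List Char) (reps : Nat) (m : Int) :
    rep2 c (p ++ r) reps m = (p ++ (rep2 c r reps m).1, (rep2 c r reps m).2) := by
  induction p with
  | nil => simp
  | cons ch p ih =>
    have h1 : ch ≠ c := fun he => h (he ▸ List.mem_cons_self)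
    have h2 : c ∉ p := fun he => h (List.mem_cons_of_mem _ he)
    simp [rep2, h1, ih h2]

lemma rep2_cons_self (c : Char) (t : List Char) (reps : Nat) (m : Int) (h : reps < 2) :
    rep2 c (c :: t) reps m
      = (PySem.Int.toChars m ++ (rep2 c t (reps + 1) (m + 1)).1, (rep2 c t (reps + 1) (m + 1)).2) := by
  simp [rep2, h]

lemma pyReplace1_cons_self (c : Char) (t w : List Char) : pyReplace1 (c :: t) [c] w = w ++ t := by
  simp [pyReplace1, List.isPrefixOf]

lemma pyReplace1_append {c : Char} {p : List Char} (h : c ∉ p) (r w : List Char) :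
    pyReplace1 (p ++ r) [c] w = p ++ pyReplace1 r [c] w := by
  induction p with
  | nil => simp
  | cons ch p ih =>
    have h1 : ch ≠ c := fun he => h (he ▸ List.mem_cons_self)
    have h2 : c ∉ p := fun he => h (List.mem_cons_of_mem _ he)
    rw [List.cons_append]
    simp [pyReplace1, List.isPrefixOf, Ne.symm h1, ih h2]

lemma countGo_single (c : Char) : ∀ (l : List Char) (fuel acc : Nat), l.length ≤ fuel →
    PySem.Chars.count.go [c] fuel l acc = acc + l.count c := by
  intro l
  induction l with
  | nil => intro fuel acc _; cases fuel <;> simp [PySem.Chars.count.go]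
  | cons ch t ih =>
    intro fuel acc hf
    cases fuel with
    | zero => simp at hf
    | succ f =>
      have hf' : t.length ≤ f := by simpa using hf
      by_cases h1 : c = ch
      · subst h1
        simp [PySem.Chars.count.go, List.isPrefixOf, ih f (acc + 1) hf']
        omega
      · simp [PySem.Chars.count.go, List.isPrefixOf, h1, ih f acc hf', Ne.symm h1]

lemma count_single (c : Char) (l : List Char) : PySem.Chars.count l [c] = l.count c := by
  simp [PySem.Chars.count, countGo_single c l l.length 0 le_rfl]

lemma replaceGo_single (c : Char) (w : List Char) : ∀ (l : List Char) (fuel : Nat) (acc : List Char),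
    l.length ≤ fuel →
    PySem.Chars.replace.go [c] w fuel l acc
      = acc.reverse ++ l.flatMap (fun ch => if ch = c then w else [ch]) := by
  intro l
  induction l with
  | nil => intro fuel acc _; cases fuel <;> simp [PySem.Chars.replace.go]
  | cons ch t ih =>
    intro fuel acc hf
    cases fuel with
    | zero => simp at hf
    | succ f =>
      have hf' : t.length ≤ f := by simpa using hf
      by_cases h1 : c = ch
      · subst h1
        simp [PySem.Chars.replace.go, List.isPrefixOf, ih f (w.reverse ++ acc) hf']
      · simp [PySem.Chars.replace.go, List.isPrefixOf, h1, ih f (ch :: acc) hf', Ne.symm h1]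

lemma replace_single (c : Char) (w l : List Char) :
    PySem.Chars.replace l [c] w = l.flatMap (fun ch => if ch = c then w else [ch]) := by
  simp [PySem.Chars.replace, replaceGo_single c w l l.length [] le_rfl]

lemma flatMap_id_of_not_mem {c : Char} {p : List Char} (h : c ∉ p) (w : List Char) :
    p.flatMap (fun ch => if ch = c then w else [ch]) = p := by
  induction p with
  | nil => simp
  | cons ch t ih =>
    have h1 : ch ≠ c := fun he => h (he ▸ List.mem_cons_self)
    have h2 : c ∉ t := fun he => h (List.mem_cons_of_mem _ he)
    simp [h1, ih h2]

lemma mem_toDigitsCore {ch : Char} : ∀ (f n : Nat) (l : List Char),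
    ch ∈ Nat.toDigitsCore 10 f n l → ch ∈ l ∨ ∃ m : Nat, m < 10 ∧ ch = Nat.digitChar m := by
  intro f
  induction f with
  | zero => intro n l h; simp [Nat.toDigitsCore] at h; exact Or.inl h
  | succ f ih =>
    intro n l h
    simp only [Nat.toDigitsCore] at h
    by_cases hz : n / 10 = 0
    · rw [if_pos hz] at h
      rcases List.mem_cons.mp h with h | h
      · exact Or.inr ⟨n % 10, Nat.mod_lt _ (by norm_num), h⟩
      · exact Or.inl h
    · rw [if_neg hz] at h
      rcases ih (n / 10) _ h with h | h
      · rcases List.mem_cons.mp h with h | h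
        · exact Or.inr ⟨n % 10, Nat.mod_lt _ (by norm_num), h⟩
        · exact Or.inl h
      · exact Or.inr h

lemma seat_not_mem_toChars {c : Char} (hc : c = 'A' ∨ c = 'W' ∨ c = 'M') (k : Int) :
    c ∉ PySem.Int.toChars k := by
  have hdig : ∀ m : Nat, m < 10 → c ≠ Nat.digitChar m := by
    intro m hm
    interval_cases m <;> rcases hc with rfl | rfl | rfl <;> decide
  have hnd : ∀ n : Nat, c ∉ Nat.toDigits 10 n := by
    intro n h
    rcases mem_toDigitsCore _ _ _ h with h | ⟨m, hm, he⟩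
    · simp at h
    · exact hdig m hm he
  intro h
  unfold PySem.Int.toChars at h
  split at h
  · rcases List.mem_cons.mp h with h | h
    · rcases hc with rfl | rfl | rfl <;> simp at h
    · exact hnd _ h
  · exact hnd _ h

lemma first_split {c : Char} : ∀ {s : List Char}, c ∈ s → ∃ p q, s = p ++ c :: q ∧ c ∉ p := by
  intro s h
  induction s with
  | nil => cases h
  | cons a t ih =>
    by_cases hac : a = c
    · exact ⟨[], t, by simp [hac], by simp⟩
    · have hct : c ∈ t := by rcases List.mem_cons.mp h with h | h; exact absurd h.symm hac; exact h
      obtain ⟨p, q, rfl, hp⟩ := ih hct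
      exact ⟨a :: p, q, by simp, by
        intro hm
        rcases List.mem_cons.mp hm with h | h
        · exact hac h.symm
        · exact hp h⟩

-- the heart: one row handled by A's helper equals B's counter-driven scan
lemma layout_row (c : Char) (L : String) (hL : L.toList = [c])
    (hw : ∀ k : Int, c ∉ PySem.Int.toChars k) (s : String) (m : Int) (cl : List String) :
    fill_seat_layout s m cl L =
      (s, (rep2 c s.toList 0 m).2.2, cl ++ [String.ofList (rep2 c s.toList 0 m).1]) := by
  unfold fill_seat_layout
  by_cases hmem : c ∈ s.toList
  · have hin : PySem.Str.isIn L s = true := by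
      simp [PySem.Str.isIn, hL, PySem.Chars.isIn_iff_infix, List.singleton_infix_iff, hmem]
    obtain ⟨p, q, hs, hp⟩ := first_split hmem
    have hcount : PySem.Str.count s L = q.count c + 1 := by
      simp [PySem.Str.count, hL, count_single, hs, List.count_append,
        List.count_eq_zero.mpr hp]
    by_cases hq : c ∈ q
    · -- at least two occurrences: first two replaced
      obtain ⟨p2, q2, hq2, hp2⟩ := first_split hq
      have hcount2 : ¬ PySem.Str.count s L = 1 := by
        rw [hcount]
        have : 0 < q.count c := List.count_pos_iff.mpr hq
        omega
      rw [hin, if_pos rfl, if_neg hcount2]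
      have hnp1 : c ∉ p ++ PySem.Int.toChars m := by
        intro h; rcases List.mem_append.mp h with h | h
        · exact hp h
        · exact hw m h
      have hr1 : pyReplace1 s.toList L.toList (PySem.Int.toChars m)
          = p ++ (PySem.Int.toChars m ++ q) := by
        rw [hL, hs, pyReplace1_append hp, pyReplace1_cons_self]
      have hr2 : pyReplace1 (p ++ (PySem.Int.toChars m ++ q)) L.toList (PySem.Int.toChars (m + 1))
          = (p ++ PySem.Int.toChars m) ++ (p2 ++ (PySem.Int.toChars (m + 1) ++ q2)) := by
        rw [hL, ← List.append_assoc, pyReplace1_append hnp1, hq2, pyReplace1_append hp2,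
          pyReplace1_cons_self]
      have hrep : rep2 c s.toList 0 m
          = (p ++ (PySem.Int.toChars m ++ (p2 ++ (PySem.Int.toChars (m + 1) ++ q2))),
             2, m + 1 + 1) := by
        rw [hs, rep2_append hp, rep2_cons_self c q 0 m (by norm_num), hq2,
          rep2_append hp2, rep2_cons_self c q2 1 (m + 1) (by norm_num),
          rep2_not_lt c q2 2 (m + 1 + 1) (by norm_num)]
      simp only [hr1, hr2, hrep]
      simp [List.append_assoc]
    · -- exactly one occurrence: global replace
      have hcount1 : PySem.Str.count s L = 1 := by
        rw [hcount, List.count_eq_zero.mpr hq]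
      rw [hin, if_pos rfl, if_pos hcount1]
      have hrepl : PySem.Str.replace s L (PySem.Int.toStr m)
          = String.ofList (p ++ PySem.Int.toChars m ++ q) := by
        simp only [PySem.Str.replace, hL, PySem.Int.toList_toStr, replace_single]
        rw [hs]
        simp [flatMap_id_of_not_mem hp, flatMap_id_of_not_mem hq]
      have hrep : rep2 c s.toList 0 m = (p ++ (PySem.Int.toChars m ++ q), 1, m + 1) := by
        rw [hs, rep2_append hp, rep2_cons_self c q 0 m (by norm_num), rep2_not_mem hq]
      simp only [hrepl, hrep]
      simp [List.append_assoc]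
  · have hin : PySem.Str.isIn L s = false := by
      simp [PySem.Str.isIn, hL, PySem.Chars.isIn_eq_false_iff, List.singleton_infix_iff, hmem]
    rw [hin]
    simp [rep2_not_mem hmem, String.ofList_toList]

lemma pyGet?_some_of {la : List String} {n : Int} (hlen : (la.length : Int) > n)
    (hla : 0 ≤ n ∨ -(la.length : Int) ≤ n) : ∃ s, PySem.List.pyGet? la n = some s := by
  unfold PySem.List.pyGet? PySem.List.pyIdx?
  by_cases h0 : 0 ≤ n
  · rw [if_pos h0, if_pos hlen]
    have : n.toNat < la.length := by omega
    simp [List.getElem?_eq_getElem this]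
  · have hge : -(la.length : Int) ≤ n := by rcases hla with h | h; exact absurd h h0; exact h
    rw [if_neg h0, if_pos hge]
    have : la.length - (-n).toNat < la.length := by omega
    simp [List.getElem?_eq_getElem this]

-- ===== VERDICT (by name: the statement is the Claim_ definition above) =====
theorem fill_seat_spec : Claim_equal_fill_seat := by
  intro main_list n main_count layout _ hpre
  unfold Spec_fill_seat fill_seat fill_seat_alt
  refine (PySem.List.foldl_congr_mem main_list _ _ _ ?_)
  intro st la hmem
  have hla : 0 ≤ n ∨ -(la.length : Int) ≤ n := by
    rcases hpre with h | h
    · exact Or.inl h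
    · exact Or.inr (h la hmem)
  by_cases hlen : (la.length : Int) > n
  · obtain ⟨s, hget⟩ := pyGet?_some_of hlen hla
    rw [if_pos hlen, if_pos hlen, hget]
    by_cases hA : layout = "A"
    · subst hA
      simp only [Option.getD_some, show ("A" == "A") = true from rfl,
        show ("A" == "W") = false from rfl, show ("A" == "M") = false from rfl,
        show "A".toList = ['A'] from rfl, Bool.true_or, if_true]
      rw [scan_eq_rep2 'A' s.toList [] 0 st.1,
        layout_row 'A' "A" rfl (fun k => seat_not_mem_toChars (Or.inl rfl) k) s st.1 st.2]
      simp
    · by_cases hW : layout = "W"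
      · subst hW
        simp only [Option.getD_some, show ("W" == "A") = false from rfl,
          show ("W" == "W") = true from rfl, show ("W" == "M") = false from rfl,
          show "W".toList = ['W'] from rfl, Bool.false_or, Bool.true_or, if_true]
        rw [scan_eq_rep2 'W' s.toList [] 0 st.1]
        simp [layout_row 'W' "W" rfl (fun k => seat_not_mem_toChars (Or.inr (Or.inl rfl)) k) s st.1 st.2]
      · by_cases hM : layout = "M"
        · subst hM
          simp only [Option.getD_some, show ("M" == "A") = false from rfl,
            show ("M" == "W") = false from rfl, show ("M" == "M") = true from rfl,
            show "M".toList = ['M'] from rfl, Bool.false_or, if_true]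
          rw [scan_eq_rep2 'M' s.toList [] 0 st.1]
          simp [layout_row 'M' "M" rfl (fun k => seat_not_mem_toChars (Or.inr (Or.inr rfl)) k) s st.1 st.2]
        · have bA : (layout == "A") = false := by simp [hA]
          have bW : (layout == "W") = false := by simp [hW]
          have bM : (layout == "M") = false := by simp [hM]
          simp [bA, bW, bM]
  · rw [if_neg hlen, if_neg hlen]
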